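-- pv_equiv track=rewrite | github.com/sterance/relic-info-extractor | gui.py | migrate_project_data
-- ===== SOURCE A (Python) =====
-- def migrate_project_data(project_data):
--     """Migrate project data from older versions for backwards compatibility
--
--     Handles the following field name changes:
--     - stack_id -> level_group_id
--     - stack_group -> level_group
--     - used_stack_groups -> used_level_groups
--
--     Returns tuple: (migrated_data, migration_performed)
--     """
--     # Check if this is an older version by looking for old field names
--     needs_migration = False
--
--     # Check data items for old field names
--     if 'data' in project_data:
--         for item in project_data['data']:
--             if 'stack_id' in item or 'stack_group' in item:
--                 needs_migration = True
--                 break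
--
--     # Check used values for old field names
--     if 'used_stack_groups' in project_data:
--         needs_migration = True
--
--     if not needs_migration:
--         return project_data, False
--
--     # Perform migration
--     migrated_data = project_data.copy()
--
--     # Migrate data items
--     if 'data' in migrated_data:
--         for item in migrated_data['data']:
--             # Migrate stack_id -> level_group_id
--             if 'stack_id' in item:
--                 item['level_group_id'] = item.pop('stack_id')
--
--             # Migrate stack_group -> level_group
--             if 'stack_group' in item:
--                 item['level_group'] = item.pop('stack_group')
--
--     # Migrate used values
--     if 'used_stack_groups' in migrated_data:
--         migrated_data['used_level_groups'] = migrated_data.pop('used_stack_groups')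
--
--     return migrated_data, True
-- ===== SOURCE B (Python) =====
-- def migrate_project_data(project_data):
--     """Rename old field names (stack_* -> level_group_*) in one pass.
--
--     Single pass with a performed flag, renames driven by a mapping,
--     instead of a separate detection pass followed by a migration pass.
--     Like the original, inner item dicts are mutated in place; the
--     no-change path returns the original project_data object.
--     """
--     performed = False
--     copy = dict(project_data)
--     renames = {'stack_id': 'level_group_id', 'stack_group': 'level_group'}
--     for item in copy.get('data', ()):
--         for old, new in renames.items():
--             if old in item:
--                 item[new] = item.pop(old)
--                 performed = True
--     if 'used_stack_groups' in copy:
--         copy['used_level_groups'] = copy.pop('used_stack_groups')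
--         performed = True
--     return (copy, True) if performed else (project_data, False)
-- ===== Notes on version B (the rewrite author's own statement) =====
-- stated objective: simpler
-- what changed: Replaced A's two-phase detect-then-migrate (a scanning pass that only decides whether migration is needed, followed by a second full migration pass) with a single pass that renames as it goes, drives the per-item renames from an {old:new} mapping, and tracks a 'performed' flag to pick the return value.
import Mathlib
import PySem

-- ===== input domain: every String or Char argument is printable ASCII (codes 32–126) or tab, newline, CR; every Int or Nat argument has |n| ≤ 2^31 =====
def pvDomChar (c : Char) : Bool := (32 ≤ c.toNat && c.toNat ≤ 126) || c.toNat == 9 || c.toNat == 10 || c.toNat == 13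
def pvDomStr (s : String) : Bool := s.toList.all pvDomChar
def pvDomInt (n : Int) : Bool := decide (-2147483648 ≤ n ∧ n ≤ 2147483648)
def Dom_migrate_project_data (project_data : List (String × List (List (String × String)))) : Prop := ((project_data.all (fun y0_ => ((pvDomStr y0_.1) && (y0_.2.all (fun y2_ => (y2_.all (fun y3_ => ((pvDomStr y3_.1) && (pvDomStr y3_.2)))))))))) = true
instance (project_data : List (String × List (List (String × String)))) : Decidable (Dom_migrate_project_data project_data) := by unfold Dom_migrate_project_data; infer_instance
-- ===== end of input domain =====

-- B replaces A's detect-then-migrate double pass by one pass with a mapping-driven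
-- rename and a 'performed' flag (objective: simpler). Both Pythons mutate the inner
-- item dicts in place; the equivalence proved here is about the RETURN value.

-- ===== PORT A =====
-- 'stack_id' in item or 'stack_group' in item
def pvItemNeedsA (item : List (String × String)) : Bool :=
  (PySem.Dict.mk item).contains "stack_id" || (PySem.Dict.mk item).contains "stack_group"

-- the migration loop body: pop the old key into the new name (in place)
def pvMigItemA (item : List (String × String)) : List (String × String) :=
  let d := PySem.Dict.mk item
  let d := match d.get? "stack_id" with
    | some v => (d.erase "stack_id").insert "level_group_id" v
    | none => d
  let d := match d.get? "stack_group" with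
    | some v => (d.erase "stack_group").insert "level_group" v
    | none => d
  d.items

def migrate_project_data (project_data : List (String × List (List (String × String)))) : (List (String × List (List (String × String)))) × Bool :=
  let d := PySem.Dict.mk project_data
  -- detection pass
  let needs_migration :=
    (match d.get? "data" with
     | some items => items.any pvItemNeedsA
     | none => false)
    || d.contains "used_stack_groups"
  if !needs_migration then (project_data, false)
  else
    -- migration pass on the shallow copy
    let m := match d.get? "data" with
      | some items => d.insert "data" (items.map pvMigItemA)
      | none => d
    let m := match m.get? "used_stack_groups" with
      | some v => (m.erase "used_stack_groups").insert "used_level_groups" v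
      | none => m
    (m.items, true)

-- ===== PORT B =====
def pvRenames : List (String × String) := [("stack_id", "level_group_id"), ("stack_group", "level_group")]

-- inner loop of B: mapping-driven renames on one item, with a performed flag
def pvMigItemB (item : List (String × String)) : (List (String × String)) × Bool :=
  let st := pvRenames.foldl
    (fun (st : PySem.Dict String String × Bool) r =>
      match st.1.get? r.1 with
      | some v => ((st.1.erase r.1).insert r.2 v, true)
      | none => st)
    (PySem.Dict.mk item, false)
  (st.1.items, st.2)

def migrate_project_data_alt (project_data : List (String × List (List (String × String)))) : (List (String × List (List (String × String)))) × Bool :=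
  let d := PySem.Dict.mk project_data
  let st := match d.get? "data" with
    | some items =>
        let st := items.foldl
          (fun (st : List (List (String × String)) × Bool) item =>
            (st.1 ++ [(pvMigItemB item).1], st.2 || (pvMigItemB item).2))
          ([], false)
        (d.insert "data" st.1, st.2)
    | none => (d, false)
  let st := match st.1.get? "used_stack_groups" with
    | some v => ((st.1.erase "used_stack_groups").insert "used_level_groups" v, true)
    | none => st
  if st.2 then (st.1.items, true) else (project_data, false)

-- ===== PRECONDITION & SPEC =====
def Spec_migrate_project_data (project_data : List (String × List (List (String × String)))) (out : (List (String × List (List (String × String)))) × Bool) : Prop := out = migrate_project_data_alt project_data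
instance (project_data : List (String × List (List (String × String)))) (out : (List (String × List (List (String × String)))) × Bool) : Decidable (Spec_migrate_project_data project_data out) := by unfold Spec_migrate_project_data; infer_instance

-- ===== CLAIM (what is proved, stated in full; the proofs are below) =====
def Claim_equal_migrate_project_data : Prop := ∀ (project_data : List (String × List (List (String × String)))), Dom_migrate_project_data project_data → Spec_migrate_project_data project_data (migrate_project_data project_data)

-- ===== LEMMAS AND PROOFS =====

-- B's per-item rename equals A's per-item migration, and its flag equals A's detection test
theorem pvMigItemB_eq (item : List (String × String)) :
    pvMigItemB item = (pvMigItemA item, pvItemNeedsA item) := by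
  unfold pvMigItemB pvMigItemA pvItemNeedsA pvRenames
  simp only [List.foldl, PySem.Dict.contains_eq_isSome_get?]
  cases h1 : (PySem.Dict.mk item).get? "stack_id" with
  | none =>
    cases h2 : (PySem.Dict.mk item).get? "stack_group" <;> simp_all
  | some v =>
    cases h2 : (((PySem.Dict.mk item).erase "stack_id").insert "level_group_id" v).get? "stack_group" <;>
      simp_all

theorem pvFold_eq (items : List (List (String × String))) (acc : List (List (String × String))) (p : Bool) :
    items.foldl
      (fun (st : List (List (String × String)) × Bool) item =>
        (st.1 ++ [(pvMigItemB item).1], st.2 || (pvMigItemB item).2))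
      (acc, p)
    = (acc ++ items.map pvMigItemA, p || items.any pvItemNeedsA) := by
  induction items generalizing acc p with
  | nil => simp
  | cons x xs ih =>
    simp only [List.foldl_cons]
    rw [ih]
    simp [pvMigItemB_eq, Bool.or_assoc]

-- ===== VERDICT (by name: the statement is the Claim_ definition above) =====
theorem migrate_project_data_spec : Claim_equal_migrate_project_data := by
  intro pd _
  unfold Spec_migrate_project_data migrate_project_data migrate_project_data_alt
  simp only [PySem.Dict.contains_eq_isSome_get?]
  cases hd : (PySem.Dict.mk pd).get? "data" with
  | none =>
    cases hu : (PySem.Dict.mk pd).get? "used_stack_groups" <;> simp_all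
  | some items =>
    simp only [pvFold_eq, List.nil_append, PySem.Dict.get?_insert, Bool.false_or,
      reduceIte, String.reduceEq]
    cases hu : (PySem.Dict.mk pd).get? "used_stack_groups" <;>
      cases ha : items.any pvItemNeedsA <;>
      simp_all
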